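-- pv_equiv track=rewrite | github.com/manasye/crossword-bf | test.py | get_board_data
-- ===== SOURCE A (Python) =====
-- char_not_accessible = '#'
--
-- def get_board_data(board):
--     """
--     Function to gather slots data from raw board
--     :param board: matrix represent crossword
--     :type board: list of list
--     :return: slot's data (slot type, start row, start col, slot length)
--     :rtype: list of tuples
--     """
--
--     def is_edge(row, col):
--         """
--         Function to check whether a row,col is an edge
--         :param row: cell row
--         :type row: int
--         :param col: cell col
--         :type col: int
--         :returns: is horizontal edge
--         :rtype: bool, bool
--         """
--
--         if row - 1 >= 0:
--             grow_up = bool(board[row - 1][col] != char_not_accessible)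
--         else:
--             grow_up = False
--
--         try:
--             grow_down = bool(board[row + 1][col] != char_not_accessible)
--         except:
--             grow_down = False
--
--         if col - 1 >= 0:
--             grow_left = bool(board[row][col - 1] != char_not_accessible)
--         else:
--             grow_left = False
--
--         try:
--             grow_right = bool(board[row][col + 1] != char_not_accessible)
--         except:
--             grow_right = False
--
--         hor_edge = grow_left ^ grow_right
--         ver_edge = grow_up ^ grow_down
--
--         return hor_edge, ver_edge
--
--     # Iterate board to gather information
--     slot_list = []
--     for row in range(0, len(board)):
--         for col in range(0, len(board[row])):
--
--             # If it's accessible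
--             if board[row][col] != char_not_accessible:
--
--                 # Get cell information
--                 horizontal_edge, vertical_edge = is_edge(row, col)
--
--                 # Count length of horizontal empty slot
--                 if horizontal_edge:
--                     length = 0
--                     while True:
--                         try:
--                             if board[row][col + length] != char_not_accessible:
--                                 length += 1
--                             else:
--                                 break
--                         except:
--                             break
--
--                     if length > 1:
--                         slot_list.append(("hor", row, col, length))
--
--                 # Count length of vertical empty slot
--                 if vertical_edge:
--                     length = 0
--                     while True:
--                         try:
--                             if board[row + length][col] != char_not_accessible:
--                                 length += 1
--                             else:
--                                 break
--                         except:
--                             break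
--
--                     if length > 1:
--                         slot_list.append(("ver", row, col, length))
--
--     return slot_list
-- ===== SOURCE B (Python) =====
-- char_not_accessible = '#'
--
-- def get_board_data(board):
--     """Two independent passes (row run-scan, then column start-scan) + one final sort."""
--     def acc(r, c):
--         return 0 <= r < len(board) and 0 <= c < len(board[r]) and board[r][c] != char_not_accessible
--
--     slots = []
--     # horizontal: maximal runs inside each row
--     for r, row in enumerate(board):
--         c = 0
--         while c < len(row):
--             if row[c] == char_not_accessible:
--                 c += 1
--                 continue
--             start = c
--             while c < len(row) and row[c] != char_not_accessible:
--                 c += 1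
--             if c - start > 1:
--                 slots.append(("hor", r, start, c - start))
--     # vertical: run starts in each column (out-of-range cells of ragged rows are inaccessible)
--     width = max((len(row) for row in board), default=0)
--     for c in range(width):
--         for r in range(len(board)):
--             if acc(r, c) and not acc(r - 1, c):
--                 n = 1
--                 while acc(r + n, c):
--                     n += 1
--                 if n > 1:
--                     slots.append(("ver", r, c, n))
--     # restore A's emission order: row-major by start cell, hor before ver at the same cell
--     slots.sort(key=lambda t: (t[1], 2 * t[2] + (t[0] == "ver")))
--     return slots
-- ===== Notes on version B (the rewrite author's own statement) =====
-- stated objective: alternative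
-- what changed: Replaces the per-cell XOR-edge test with two independent passes - a maximal-run scan of each row and a run-start scan of each column (ragged out-of-range cells treated as inaccessible) - followed by one stable sort that restores the original row-major, hor-before-ver emission order.
import Mathlib
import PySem

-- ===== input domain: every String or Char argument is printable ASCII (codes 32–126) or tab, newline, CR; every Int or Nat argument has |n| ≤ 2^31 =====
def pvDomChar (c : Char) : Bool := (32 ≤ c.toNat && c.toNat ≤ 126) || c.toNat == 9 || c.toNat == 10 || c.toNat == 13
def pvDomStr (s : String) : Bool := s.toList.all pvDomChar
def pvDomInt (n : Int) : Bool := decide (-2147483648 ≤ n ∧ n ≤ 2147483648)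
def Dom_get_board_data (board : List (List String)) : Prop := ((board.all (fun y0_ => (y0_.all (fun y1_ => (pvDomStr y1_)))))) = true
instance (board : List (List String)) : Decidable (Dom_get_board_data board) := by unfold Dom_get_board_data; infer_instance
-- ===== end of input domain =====

-- B replaces A's per-cell XOR-edge detection with two independent passes (row run-scan, column
-- start-scan) plus one final sort restoring A's emission order; equal wherever A returns (Pre_).

-- ===== PORT A =====
-- board[r][c] where either index may raise IndexError (none = the exception)
def pvCellA (board : List (List String)) (r c : Int) : Option String :=
  (PySem.List.pyGet? board r).bind (fun row => PySem.List.pyGet? row c)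

-- "try: board[r][c] != '#' except: False"
def pvAccA (board : List (List String)) (r c : Int) : Bool :=
  match pvCellA board r c with
  | some s => s != "#"
  | none => false

-- the 'length = 0; while board[..+length] accessible: length += 1' loops; the fuel argument only
-- makes the recursion total, it always exceeds the count actually reached
def pvCount (p : Int → Bool) (i : Int) : Nat → Int
  | 0 => 0
  | f+1 => if p i then pvCount p (i+1) f + 1 else 0

def pvIsEdge (board : List (List String)) (r c : Int) : Bool × Bool :=
  -- grow_up reads board[r-1][c] UNGUARDED: the IndexError case (pvCellA = none) is excluded by
  -- Pre_get_board_data, the .getD "#" stands for the raising access and is never reached under Pre_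
  let grow_up := if 0 ≤ r - 1 then ((pvCellA board (r-1) c).getD "#") != "#" else false
  let grow_down := pvAccA board (r+1) c
  -- board[r][c-1] is always in range when is_edge is called (0 ≤ c-1 < c < len(board[r]))
  let grow_left := if 0 ≤ c - 1 then ((pvCellA board r (c-1)).getD "#") != "#" else false
  let grow_right := pvAccA board r (c+1)
  (xor grow_left grow_right, xor grow_up grow_down)

def get_board_data (board : List (List String)) : List (String × Int × Int × Int) :=
  (PySem.List.pyRange 0 (board.length : Int) 1).foldl (fun slot_list row =>
    let rowLen := (PySem.List.pyGetD board row []).length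
    (PySem.List.pyRange 0 (rowLen : Int) 1).foldl (fun s col =>
      if pvAccA board row col then
        let e := pvIsEdge board row col
        let s := if e.1 then
            let length := pvCount (fun i => pvAccA board row i) col (rowLen + 1)
            if 1 < length then s ++ [("hor", row, col, length)] else s
          else s
        if e.2 then
          let length := pvCount (fun i => pvAccA board i col) row (board.length + 1)
          if 1 < length then s ++ [("ver", row, col, length)] else s
        else s
      else s) slot_list) []

-- ===== PORT B =====
-- acc(r, c): bounds-checked accessibility, out-of-range cells of ragged rows are inaccessible
def altAcc (board : List (List String)) (r c : Int) : Bool :=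
  if 0 ≤ r ∧ r < (board.length : Int) then
    if 0 ≤ c ∧ c < ((PySem.List.pyGetD board r []).length : Int) then
      (PySem.List.pyGetD (PySem.List.pyGetD board r []) c "") != "#"
    else false
  else false

-- length of the accessible prefix ('while c < len(row) and row[c] != "#"')
def altRunLen : List String → Nat
  | [] => 0
  | x :: rest => if x == "#" then 0 else altRunLen rest + 1

-- the row while-loop: emit every maximal run of length > 1 (fuel only makes it total; one
-- unit per loop iteration, so the row's length is always enough)
def altRowScan (r c : Int) : List String → Nat → List (String × Int × Int × Int)
  | _, 0 => []
  | [], _ => []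
  | x :: rest, f + 1 =>
    if x == "#" then altRowScan r (c + 1) rest f
    else
      let k := altRunLen rest
      (if 1 < k + 1 then [("hor", r, c, ((k : Int) + 1))] else []) ++
        altRowScan r (c + (k : Int) + 1) (rest.drop k) f

-- 'for r, row in enumerate(board)'
def altRows (r : Int) : List (List String) → List (String × Int × Int × Int)
  | [] => []
  | row :: rest => altRowScan r 0 row row.length ++ altRows (r + 1) rest

-- 'n = 1; while acc(r + n, c): n += 1' counts from r upward; fuel only for totality
def altVCount (board : List (List String)) (c r : Int) : Nat → Nat
  | 0 => 0
  | f+1 => if altAcc board r c then altVCount board c (r + 1) f + 1 else 0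

def get_board_data_alt (board : List (List String)) : List (String × Int × Int × Int) :=
  let hors := altRows 0 board
  let width : Nat := board.foldl (fun m row => max m row.length) 0
  let vers := (PySem.List.pyRange 0 (width : Int) 1).flatMap (fun c =>
    (PySem.List.pyRange 0 (board.length : Int) 1).flatMap (fun r =>
      if altAcc board r c && !altAcc board (r - 1) c then
        let n : Int := 1 + (altVCount board c (r + 1) board.length : Int)
        if 1 < n then [("ver", r, c, n)] else []
      else []))
  PySem.List.sorted2 (hors ++ vers) (fun t => t.2.1)
    (fun t => 2 * t.2.2.1 + (if t.1 == "ver" then 1 else 0))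

-- ===== PRECONDITION & SPEC =====
-- Pre_ excludes exactly the ragged boards on which A raises IndexError: some accessible cell
-- whose row directly above is too short for the unguarded board[r-1][c] grow_up access.
def Pre_get_board_data (board : List (List String)) : Prop :=
  ∀ r < board.length, ∀ c < (board.getD r []).length,
    0 < r → (board.getD r []).getD c "" ≠ "#" → c < (board.getD (r - 1) []).length
instance (board : List (List String)) : Decidable (Pre_get_board_data board) := by
  unfold Pre_get_board_data; infer_instance

def pvWitness_get_board_data : List (List String) := [["a", "a"], ["a", "#"]]

def Spec_get_board_data (board : List (List String)) (out : List (String × Int × Int × Int)) : Prop :=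
  out = get_board_data_alt board
instance (board : List (List String)) (out : List (String × Int × Int × Int)) :
    Decidable (Spec_get_board_data board out) := by unfold Spec_get_board_data; infer_instance

-- ===== CLAIM (what is proved, stated in full; the proofs are below) =====
def Claim_equal_get_board_data : Prop := ∀ (board : List (List String)),
  Dom_get_board_data board → Pre_get_board_data board →
    Spec_get_board_data board (get_board_data board)

-- ===== LEMMAS AND PROOFS =====

-- board[r] as a list (the default is never used at in-range nonnegative r)
def rowL (board : List (List String)) (r : Int) : List String := PySem.List.pyGetD board r []

-- A's per-cell emission, as one list
def cellE (board : List (List String)) (r c : Int) : List (String × Int × Int × Int) :=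
  if pvAccA board r c then
    let e := pvIsEdge board r c
    (if e.1 then
        let len := pvCount (fun i => pvAccA board r i) c ((rowL board r).length + 1)
        if 1 < len then [("hor", r, c, len)] else []
      else []) ++
    (if e.2 then
        let len := pvCount (fun i => pvAccA board i c) r (board.length + 1)
        if 1 < len then [("ver", r, c, len)] else []
      else [])
  else []

-- per-cell emissions, phrased with B's accessibility test on the neighbours
def Ehor (board : List (List String)) (r c : Int) : List (String × Int × Int × Int) :=
  if altAcc board r c && !altAcc board r (c - 1) then
    let len := pvCount (fun i => pvAccA board r i) c ((rowL board r).length + 1)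
    if 1 < len then [("hor", r, c, len)] else []
  else []

def Ever (board : List (List String)) (r c : Int) : List (String × Int × Int × Int) :=
  if altAcc board r c && !altAcc board (r - 1) c then
    let len := pvCount (fun i => pvAccA board i c) r (board.length + 1)
    if 1 < len then [("ver", r, c, len)] else []
  else []

def slotKey (t : String × Int × Int × Int) : Lex (Int × Int) :=
  toLex (t.2.1, 2 * t.2.2.1 + (if t.1 == "ver" then 1 else 0))

-- ---- accessibility basics ----
theorem altAcc_false (board : List (List String)) (r c : Int)
    (h : r < 0 ∨ (board.length : Int) ≤ r ∨ c < 0 ∨ ((rowL board r).length : Int) ≤ c) :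
    altAcc board r c = false := by
  unfold altAcc rowL at *
  split_ifs with h1 h2 <;> simp_all <;> omega

theorem altAcc_nat (board : List (List String)) (r : Int) (hr0 : 0 ≤ r)
    (hrn : r < (board.length : Int)) (c : Nat) :
    altAcc board r (c : Int) =
      (match (rowL board r)[c]? with | some s => s != "#" | none => false) := by
  unfold altAcc rowL
  by_cases hc : c < (PySem.List.pyGetD board r []).length
  · rw [if_pos ⟨hr0, hrn⟩, if_pos ⟨Int.natCast_nonneg c, by exact_mod_cast hc⟩]
    rw [PySem.List.pyGetD_eq_getElem _ _ (Int.natCast_nonneg c) (by exact_mod_cast hc)]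
    rw [List.getElem?_eq_getElem hc]
    simp
  · rw [if_pos ⟨hr0, hrn⟩, if_neg (by push_cast; omega)]
    rw [List.getElem?_eq_none (by omega)]

theorem accA_eq_altAcc (board : List (List String)) {r c : Int} (hr : 0 ≤ r) (hc : 0 ≤ c) :
    pvAccA board r c = altAcc board r c := by
  unfold pvAccA pvCellA altAcc
  rw [PySem.List.pyGet?_of_nonneg _ hr]
  by_cases hrn : r.toNat < board.length
  · rw [List.getElem?_eq_getElem hrn]
    simp only [Option.bind_some]
    rw [PySem.List.pyGet?_of_nonneg _ hc]
    have hrow : PySem.List.pyGetD board r [] = board[r.toNat] :=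
      PySem.List.pyGetD_eq_getElem _ _ hr (by omega)
    by_cases hcn : c.toNat < board[r.toNat].length
    · rw [List.getElem?_eq_getElem hcn]
      rw [if_pos ⟨hr, by omega⟩]
      rw [hrow, if_pos ⟨hc, by omega⟩]
      rw [PySem.List.pyGetD_eq_getElem _ _ hc (by omega)]
    · rw [List.getElem?_eq_none (by omega)]
      rw [if_pos ⟨hr, by omega⟩, hrow, if_neg (by omega)]
  · rw [List.getElem?_eq_none (by omega)]
    rw [if_neg (by omega)]
    rfl

theorem rowL_eq_getD (board : List (List String)) {r : Int} (hr : 0 ≤ r) :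
    rowL board r = board.getD r.toNat [] := by
  unfold rowL
  by_cases hrn : r.toNat < board.length
  · rw [PySem.List.pyGetD_eq_getElem _ _ hr (by omega), List.getD_eq_getElem _ _ hrn]
  · rw [List.getD_eq_default _ _ (by omega)]
    simp [PySem.List.pyGetD, PySem.List.pyGet?_of_nonneg _ hr, List.getElem?_eq_none (by omega : board.length ≤ r.toNat)]

theorem rowL_eq_getElem (board : List (List String)) {r : Int} (hr0 : 0 ≤ r)
    (hrn : r < (board.length : Int)) :
    rowL board r = board[r.toNat]'(by omega) :=
  PySem.List.pyGetD_eq_getElem _ _ hr0 hrn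

-- ---- counting loops ----
theorem pvCount_eq_of_run (p : Int → Bool) (m : Nat) (i : Int) (fuel : Nat)
    (hrun : ∀ j : Nat, j < m → p (i + j) = true) (hstop : p (i + m) = false) (hf : m < fuel) :
    pvCount p i fuel = (m : Int) := by
  induction m generalizing i fuel with
  | zero =>
    obtain ⟨f, rfl⟩ : ∃ f, fuel = f + 1 := ⟨fuel - 1, by omega⟩
    simp only [pvCount]
    rw [show i + ((0 : Nat) : Int) = i by omega] at hstop
    simp [hstop]
  | succ m ih =>
    obtain ⟨f, rfl⟩ : ∃ f, fuel = f + 1 := ⟨fuel - 1, by omega⟩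
    simp only [pvCount]
    have h0 : p i = true := by have := hrun 0 (by omega); simpa using this
    rw [h0]
    simp only [if_true]
    rw [ih (i + 1) f (fun j hj => by
        have := hrun (j + 1) (by omega)
        rw [show i + 1 + (j : Int) = i + ((j : Nat) + 1 : Nat) by push_cast; ring]
        exact this)
      (by rw [show i + 1 + (m : Int) = i + ((m + 1 : Nat) : Int) by push_cast; ring]; exact hstop)
      (by omega)]
    push_cast; ring

theorem altVCount_eq_pvCount (board : List (List String)) (c : Int) (f : Nat) :
    ∀ r : Int, (altVCount board c r f : Int) = pvCount (fun i => altAcc board i c) r f := by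
  induction f with
  | zero => intro r; simp [altVCount, pvCount]
  | succ f ih =>
    intro r
    simp only [altVCount, pvCount]
    split
    · rw [← ih (r + 1)]; push_cast; ring
    · rfl

-- ---- run-length helper ----
theorem altRunLen_le (l : List String) : altRunLen l ≤ l.length := by
  induction l with
  | nil => simp [altRunLen]
  | cons x rest ih => simp only [altRunLen]; split <;> simp <;> omega

theorem altRunLen_run (l : List String) :
    ∀ j, j < altRunLen l → ∃ s, l[j]? = some s ∧ (s == "#") = false := by
  induction l with
  | nil => simp [altRunLen]
  | cons x rest ih =>
    intro j hj
    simp only [altRunLen] at hj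
    split at hj
    · omega
    · match j with
      | 0 => exact ⟨x, by simp, by simp_all⟩
      | j + 1 =>
        obtain ⟨s, hs1, hs2⟩ := ih j (by omega)
        exact ⟨s, by simpa using hs1, hs2⟩

theorem altRunLen_stop (l : List String) (h : altRunLen l < l.length) :
    l[altRunLen l]? = some "#" := by
  induction l with
  | nil => simp at h
  | cons x rest ih =>
    simp only [altRunLen] at h ⊢
    split
    · rename_i hx
      simp only [List.getElem?_cons_zero]
      have : x = "#" := by simpa using hx
      rw [this]
    · rename_i hx
      rw [if_neg hx] at h
      simp only [List.length_cons] at h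
      simpa using ih (by omega)

-- ---- B's row scan = start-detection over the column range ----
theorem rowScan_eq (board : List (List String)) (r : Int) (hr0 : 0 ≤ r)
    (hrn : r < (board.length : Int)) (fuel : Nat) :
    ∀ c0 : Nat, (rowL board r).length - c0 ≤ fuel →
      (altAcc board r (c0 : Int) = true → altAcc board r ((c0 : Int) - 1) = false) →
      altRowScan r (c0 : Int) ((rowL board r).drop c0) fuel =
        (PySem.List.pyRange (c0 : Int) ((rowL board r).length : Int)).flatMap
          (fun c => Ehor board r c) := by
  have haccj : ∀ j : Nat, (hj : j < (rowL board r).length) →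
      altAcc board r (j : Int) = ((rowL board r)[j] != "#") := by
    intro j hj
    rw [altAcc_nat board r hr0 hrn j, List.getElem?_eq_getElem hj]
  have haccbig : ∀ j : Int, ((rowL board r).length : Int) ≤ j → altAcc board r j = false := by
    intro j hj
    exact altAcc_false board r j (by omega)
  induction fuel with
  | zero =>
    intro c0 hf hs
    rw [List.drop_of_length_le (by omega)]
    simp [altRowScan, PySem.List.pyRange_one,
      show (((rowL board r).length : Int) - (c0 : Int)).toNat = 0 by omega]
  | succ f ih =>
    intro c0 hf hs
    by_cases hc : c0 < (rowL board r).length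
    case neg =>
      rw [List.drop_of_length_le (by omega)]
      simp [altRowScan, PySem.List.pyRange_one,
        show (((rowL board r).length : Int) - (c0 : Int)).toNat = 0 by omega]
    case pos =>
    have hdrop : (rowL board r).drop c0 = (rowL board r)[c0] :: (rowL board r).drop (c0 + 1) :=
      List.drop_eq_getElem_cons hc
    rw [hdrop]
    simp only [altRowScan]
    have hrange : PySem.List.pyRange (c0 : Int) ((rowL board r).length : Int)
        = (c0 : Int) :: PySem.List.pyRange ((c0 : Int) + 1) ((rowL board r).length : Int) :=
      PySem.List.pyRange_one_cons (by omega)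
    by_cases hx : ((rowL board r)[c0] == "#") = true
    · rw [if_pos hx]
      have hacc0 : altAcc board r (c0 : Int) = false := by
        rw [haccj c0 hc]
        simpa using (by simpa using hx : (rowL board r)[c0] = "#")
      have hE0 : Ehor board r (c0 : Int) = [] := by
        unfold Ehor
        rw [hacc0]
        simp
      rw [hrange, List.flatMap_cons, hE0, List.nil_append]
      have := ih (c0 + 1) (by omega) (by
        intro _
        rw [show ((c0 + 1 : Nat) : Int) - 1 = (c0 : Int) by push_cast; ring]
        exact hacc0)
      rw [show ((c0 + 1 : Nat) : Int) = (c0 : Int) + 1 by push_cast; ring] at this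
      exact this
    · rw [if_neg hx]
      have hacc0 : altAcc board r (c0 : Int) = true := by
        rw [haccj c0 hc]
        simpa using hx
      -- the run: cells c0 .. c0+k accessible, c0+k+1 blocked
      set rest := (rowL board r).drop (c0 + 1) with hrestdef
      set k := altRunLen rest with hkdef
      have hrestlen : rest.length = (rowL board r).length - (c0 + 1) := by
        rw [hrestdef]; simp
      have hkle : k ≤ rest.length := altRunLen_le rest
      have hrun : ∀ j : Nat, j ≤ k → altAcc board r ((c0 : Int) + j) = true := by
        intro j hj
        match j with
        | 0 => simpa using hacc0
        | j + 1 =>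
          obtain ⟨sv, hs1, hs2⟩ := altRunLen_run rest j (by omega)
          have hj2 : c0 + 1 + j < (rowL board r).length := by omega
          have : (rowL board r)[c0 + 1 + j]? = some sv := by
            rw [← hs1, hrestdef, List.getElem?_drop]
          rw [show (c0 : Int) + ((j + 1 : Nat) : Int) = ((c0 + 1 + j : Nat) : Int) by push_cast; ring]
          rw [haccj _ hj2]
          rw [List.getElem?_eq_getElem hj2] at this
          simp only [Option.some_inj] at this
          rw [this]
          simpa using hs2
      have hstop : altAcc board r ((c0 : Int) + ((k + 1 : Nat) : Int)) = false := by
        by_cases hkl : k < rest.length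
        · have := altRunLen_stop rest hkl
          have hj2 : c0 + 1 + k < (rowL board r).length := by omega
          have hv : (rowL board r)[c0 + 1 + k]? = some "#" := by
            rw [← this, hrestdef, List.getElem?_drop]
          rw [show (c0 : Int) + ((k + 1 : Nat) : Int) = ((c0 + 1 + k : Nat) : Int) by push_cast; ring]
          rw [haccj _ hj2]
          rw [List.getElem?_eq_getElem hj2] at hv
          simp only [Option.some_inj] at hv
          rw [hv]
          simp
        · apply haccbig
          push_cast
          omega
      have hcount : pvCount (fun i => pvAccA board r i) (c0 : Int) ((rowL board r).length + 1)
          = ((k + 1 : Nat) : Int) := by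
        apply pvCount_eq_of_run
        · intro j hj
          rw [accA_eq_altAcc board hr0 (by omega)]
          exact hrun j (by omega)
        · rw [accA_eq_altAcc board hr0 (by omega)]
          exact hstop
        · omega
      have hE0 : Ehor board r (c0 : Int)
          = (if 1 < k + 1 then [("hor", r, (c0 : Int), ((k : Int) + 1))] else []) := by
        unfold Ehor
        rw [hacc0, hs hacc0]
        simp only [Bool.not_false, Bool.and_true, if_true]
        rw [hcount]
        by_cases hk : 1 < k + 1
        · rw [if_pos hk, if_pos (by push_cast; omega)]
          norm_num
        · rw [if_neg hk, if_neg (by push_cast; omega)]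
      -- middle cells emit nothing
      have hmid : (PySem.List.pyRange ((c0 : Int) + 1) ((c0 : Int) + (k : Int) + 1)).flatMap
          (fun c => Ehor board r c) = [] := by
        rw [List.flatMap_eq_nil_iff]
        intro x hxm
        rw [PySem.List.mem_pyRange_one] at hxm
        unfold Ehor
        have h1 : altAcc board r (x - 1) = true := by
          have := hrun (x - 1 - c0).toNat (by omega)
          rw [show ((c0 : Int) + ((x - 1 - c0).toNat : Int)) = x - 1 by omega] at this
          exact this
        rw [h1]
        simp
      -- recursion
      have hrec := ih (c0 + 1 + k) (by omega) (by
        intro hcon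
        rw [show ((c0 + 1 + k : Nat) : Int) = (c0 : Int) + ((k + 1 : Nat) : Int) by push_cast; ring,
          hstop] at hcon
        exact absurd hcon (by simp))
      have hdr : (rowL board r).drop (c0 + 1 + k) = rest.drop k := by
        rw [hrestdef, List.drop_drop]
      rw [hdr] at hrec
      rw [show ((c0 + 1 + k : Nat) : Int) = (c0 : Int) + (k : Int) + 1 by push_cast; ring] at hrec
      rw [hrec]
      -- assemble the range split
      rw [PySem.List.pyRange_one_append (c0 : Int) ((c0 : Int) + (k : Int) + 1)
        ((rowL board r).length : Int) (by omega) (by omega)]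
      rw [List.flatMap_append]
      rw [show PySem.List.pyRange (c0 : Int) ((c0 : Int) + (k : Int) + 1)
          = (c0 : Int) :: PySem.List.pyRange ((c0 : Int) + 1) ((c0 : Int) + (k : Int) + 1)
          from PySem.List.pyRange_one_cons (by omega)]
      rw [List.flatMap_cons, hE0, hmid]
      simp

theorem altRows_general (board : List (List String)) :
    ∀ (suffix : List (List String)) (r0 : Nat), board.drop r0 = suffix →
      altRows (r0 : Int) suffix =
        (PySem.List.pyRange (r0 : Int) (board.length : Int)).flatMap (fun r =>
          (PySem.List.pyRange 0 ((rowL board r).length : Int)).flatMap (fun c => Ehor board r c)) := by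
  intro suffix
  induction suffix with
  | nil =>
    intro r0 hdrop
    have : board.length ≤ r0 := by
      rw [List.drop_eq_nil_iff] at hdrop
      exact hdrop
    simp [altRows, PySem.List.pyRange_one,
      show ((board.length : Int) - (r0 : Int)).toNat = 0 by omega]
  | cons row rest ih =>
    intro r0 hdrop
    have hr0 : r0 < board.length := by
      by_contra hcon
      rw [List.drop_of_length_le (by omega)] at hdrop
      simp at hdrop
    have hrow : board[r0]'hr0 = row := by
      rw [List.drop_eq_getElem_cons hr0] at hdrop
      exact (List.cons.injEq _ _ _ _ ▸ hdrop).1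
    have hrest : board.drop (r0 + 1) = rest := by
      rw [List.drop_eq_getElem_cons hr0] at hdrop
      exact (List.cons.injEq _ _ _ _ ▸ hdrop).2
    have hrowL : rowL board (r0 : Int) = row := by
      rw [rowL_eq_getElem board (by omega) (by exact_mod_cast hr0)]
      simpa using hrow
    simp only [altRows]
    rw [show PySem.List.pyRange (r0 : Int) (board.length : Int)
        = (r0 : Int) :: PySem.List.pyRange ((r0 : Int) + 1) (board.length : Int)
        from PySem.List.pyRange_one_cons (by exact_mod_cast hr0)]
    rw [List.flatMap_cons]
    congr 1
    · have := rowScan_eq board (r0 : Int) (by omega) (by exact_mod_cast hr0) row.length 0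
        (by rw [hrowL]; omega) (by
          intro _
          exact altAcc_false board (r0 : Int) (((0 : Nat) : Int) - 1) (by omega))
      rw [List.drop_zero, hrowL] at this
      rw [hrowL]
      simpa using this
    · have := ih (r0 + 1) hrest
      rw [show ((r0 + 1 : Nat) : Int) = (r0 : Int) + 1 by push_cast; ring] at this
      exact this

theorem altRows_eq (board : List (List String)) :
    altRows 0 board =
      (PySem.List.pyRange 0 (board.length : Int)).flatMap (fun r =>
        (PySem.List.pyRange 0 ((rowL board r).length : Int)).flatMap (fun c => Ehor board r c)) := by
  have := altRows_general board board 0 (by simp)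
  simpa using this

-- ---- generic fold/flatMap helpers ----
theorem foldl_body_append {α β : Type} (l : List α) (body : List β → α → List β)
    (f : α → List β) (h : ∀ s a, body s a = s ++ f a) :
    ∀ init, l.foldl body init = init ++ l.flatMap f := by
  induction l with
  | nil => intro init; simp
  | cons a l ih => intro init; simp only [List.foldl_cons, List.flatMap_cons, h]; rw [ih]; simp

theorem flatMap_congr_mem {α β : Type} (l : List α) (f g : α → List β)
    (h : ∀ a ∈ l, f a = g a) : l.flatMap f = l.flatMap g := by
  induction l with
  | nil => simp
  | cons a l ih =>
    simp only [List.flatMap_cons]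
    rw [h a (by simp), ih (fun x hx => h x (by simp [hx]))]

theorem pvCount_congr (p q : Int → Bool) (f : Nat) :
    ∀ i : Int, (∀ j : Nat, j < f → p (i + j) = q (i + j)) → pvCount p i f = pvCount q i f := by
  induction f with
  | zero => intro i _; rfl
  | succ f ih =>
    intro i h
    simp only [pvCount]
    have h0 : p i = q i := by have := h 0 (by omega); simpa using this
    rw [h0]
    rw [ih (i + 1) (fun j hj => by
      have := h (j + 1) (by omega)
      rw [show i + 1 + (j : Int) = i + ((j + 1 : Nat) : Int) by push_cast; ring]
      exact this)]

-- ---- A flattened ----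
theorem getA_eq_flatMap (board : List (List String)) :
    get_board_data board =
      (PySem.List.pyRange 0 (board.length : Int)).flatMap (fun r =>
        (PySem.List.pyRange 0 ((rowL board r).length : Int)).flatMap (fun c => cellE board r c)) := by
  unfold get_board_data
  rw [foldl_body_append _ _
    (fun r => (PySem.List.pyRange 0 ((rowL board r).length : Int)).flatMap (fun c => cellE board r c))
    ?_ []]
  · simp
  intro s r
  rw [foldl_body_append _ _ (cellE board r) ?_ s]
  · simp [rowL]
  · intro s' col
    unfold cellE rowL
    by_cases hacc : pvAccA board r col
    · simp only [hacc, if_true]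
      split_ifs <;> simp
    · simp [hacc]

-- ---- the per-cell XOR-edge test agrees with run-start detection (under Pre_) ----
theorem grow_eq_acc (board : List (List String)) {r c : Int} (hr0 : 0 ≤ r)
    (hrn : r < (board.length : Int)) (hc0 : 0 ≤ c)
    (hcl : c < ((rowL board r).length : Int)) :
    (((pvCellA board r c).getD "#") != "#") = altAcc board r c := by
  have hrow := rowL_eq_getElem board hr0 hrn
  have hcl' : c < ((PySem.List.pyGetD board r []).length : Int) := hcl
  unfold pvCellA
  rw [PySem.List.pyGet?_of_nonneg _ hr0,
    List.getElem?_eq_getElem (show r.toNat < board.length by omega)]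
  simp only [Option.bind_some]
  rw [PySem.List.pyGet?_of_nonneg _ hc0,
    List.getElem?_eq_getElem (show c.toNat < board[r.toNat].length by rw [← hrow]; omega)]
  rw [Option.getD_some]
  unfold altAcc
  rw [if_pos ⟨hr0, hrn⟩, if_pos ⟨hc0, hcl'⟩,
    PySem.List.pyGetD_eq_getElem _ _ hc0 hcl']
  have hrow' : PySem.List.pyGetD board r [] = board[r.toNat]'(by omega) := hrow
  congr 1
  · simp only [hrow']

theorem xor_emit_eq (L R : Bool) (cnt : Int) (t : String × Int × Int × Int)
    (h1 : R = false → cnt = 1) :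
    (if (xor L R) = true then (if 1 < cnt then [t] else []) else []) =
      (if (!L) = true then (if 1 < cnt then [t] else []) else []) := by
  cases L <;> cases R <;> simp_all

theorem cellE_eq (board : List (List String)) (hpre : Pre_get_board_data board) (r c : Int)
    (hr0 : 0 ≤ r) (hrn : r < (board.length : Int)) (hc0 : 0 ≤ c)
    (hcl : c < ((rowL board r).length : Int)) :
    cellE board r c = Ehor board r c ++ Ever board r c := by
  by_cases hacc : altAcc board r c = true
  case neg =>
    have haccf : altAcc board r c = false := by simpa using hacc
    have hpA : pvAccA board r c = false := by rw [accA_eq_altAcc board hr0 hc0]; exact haccf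
    unfold cellE Ehor Ever
    rw [hpA, haccf]
    simp
  case pos =>
  have hpA : pvAccA board r c = true := by rw [accA_eq_altAcc board hr0 hc0]; exact hacc
  -- the four neighbour tests, rewritten to B's accessibility test
  have hGL : (if 0 ≤ c - 1 then (((pvCellA board r (c - 1)).getD "#") != "#") else false)
      = altAcc board r (c - 1) := by
    by_cases hc1 : 0 ≤ c - 1
    · rw [if_pos hc1]
      exact grow_eq_acc board hr0 hrn hc1 (by omega)
    · rw [if_neg hc1, (altAcc_false board r (c - 1) (by omega)).symm]
  have hGR : pvAccA board r (c + 1) = altAcc board r (c + 1) :=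
    accA_eq_altAcc board hr0 (by omega)
  have hGD : pvAccA board (r + 1) c = altAcc board (r + 1) c :=
    accA_eq_altAcc board (by omega) hc0
  have hGU : (if 0 ≤ r - 1 then (((pvCellA board (r - 1) c).getD "#") != "#") else false)
      = altAcc board (r - 1) c := by
    by_cases hr1 : 0 ≤ r - 1
    · rw [if_pos hr1]
      -- Pre_ : the cell is accessible, so the row above is long enough
      have hvne : (PySem.List.pyGetD (PySem.List.pyGetD board r []) c "") ≠ "#" := by
        have h2 := hacc
        unfold altAcc at h2
        rw [if_pos ⟨hr0, hrn⟩, if_pos ⟨hc0, hcl⟩] at h2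
        simpa using h2
      have habove : c < ((rowL board (r - 1)).length : Int) := by
        have hgd : board.getD r.toNat [] = rowL board r := (rowL_eq_getD board hr0).symm
        have hgd1 : board.getD (r.toNat - 1) [] = rowL board (r - 1) := by
          rw [rowL_eq_getD board hr1, show (r - 1).toNat = r.toNat - 1 by omega]
        have hcv : (board.getD r.toNat []).getD c.toNat ""
            = PySem.List.pyGetD (PySem.List.pyGetD board r []) c "" := by
          rw [hgd]
          rw [List.getD_eq_getElem _ _ (show c.toNat < (rowL board r).length by omega)]
          exact (PySem.List.pyGetD_eq_getElem _ _ hc0 hcl).symm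
        have := hpre r.toNat (by omega) c.toNat (by rw [hgd]; omega) (by omega)
          (by rw [hcv]; exact hvne)
        rw [hgd1] at this
        omega
      exact grow_eq_acc board hr1 (by omega) hc0 habove
    · rw [if_neg hr1, (altAcc_false board (r - 1) c (by omega)).symm]
  -- the two counters are 1 when the next cell is blocked
  have hlen1 : altAcc board r (c + 1) = false →
      pvCount (fun i => pvAccA board r i) c ((rowL board r).length + 1) = 1 := by
    intro hR
    apply pvCount_eq_of_run _ 1
    · intro j hj
      have : j = 0 := by omega
      subst this
      simpa using hpA
    · show pvAccA board r (c + ((1 : Nat) : Int)) = false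
      push_cast
      rw [hGR]; exact hR
    · omega
  have hvlen1 : altAcc board (r + 1) c = false →
      pvCount (fun i => pvAccA board i c) r (board.length + 1) = 1 := by
    intro hD
    apply pvCount_eq_of_run _ 1
    · intro j hj
      have : j = 0 := by omega
      subst this
      simpa using hpA
    · show pvAccA board (r + ((1 : Nat) : Int)) c = false
      push_cast
      rw [hGD]; exact hD
    · omega
  -- assemble
  unfold cellE Ehor Ever pvIsEdge
  rw [hpA, hacc]
  simp only [Bool.true_and, if_true]
  rw [hGL, hGR, hGU, hGD]
  congr 1
  · exact xor_emit_eq _ _ _ _ hlen1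
  · exact xor_emit_eq _ _ _ _ hvlen1

-- ---- permutation toolkit ----
theorem flatMap_congr_perm {α β : Type} (l : List α) (f g : α → List β)
    (h : ∀ a ∈ l, (f a).Perm (g a)) : (l.flatMap f).Perm (l.flatMap g) := by
  induction l with
  | nil => simp
  | cons a l ih =>
    simp only [List.flatMap_cons]
    exact (h a (by simp)).append (ih (fun x hx => h x (by simp [hx])))

theorem flatMap_append_perm {α β : Type} (l : List α) (f g : α → List β) :
    (l.flatMap (fun x => f x ++ g x)).Perm (l.flatMap f ++ l.flatMap g) := by
  induction l with
  | nil => simp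
  | cons a l ih =>
    simp only [List.flatMap_cons]
    refine (ih.append_left (f a ++ g a)).trans ?_
    rw [List.append_assoc (f a), List.append_assoc (f a)]
    refine List.Perm.append_left (f a) ?_
    rw [← List.append_assoc, ← List.append_assoc]
    exact (List.perm_append_comm.append_right _).trans (by rw [List.append_assoc])

theorem flatMap_swap_perm {α β γ : Type} (l1 : List α) (l2 : List β) (f : α → β → List γ) :
    (l1.flatMap (fun a => l2.flatMap (fun b => f a b))).Perm
      (l2.flatMap (fun b => l1.flatMap (fun a => f a b))) := by
  induction l1 with
  | nil => simp
  | cons a l1 ih =>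
    simp only [List.flatMap_cons]
    exact (ih.append_left _).trans (flatMap_append_perm l2 _ _).symm

theorem pairwise_flatMap_key {α : Type} (l : List Int) (f : Int → List α)
    (key : α → Lex (Int × Int)) (hl : l.Pairwise (· < ·))
    (hin : ∀ i ∈ l, (f i).Pairwise (fun a b => key a < key b))
    (hcross : ∀ i ∈ l, ∀ j ∈ l, i < j → ∀ a ∈ f i, ∀ b ∈ f j, key a < key b) :
    (l.flatMap f).Pairwise (fun a b => key a < key b) := by
  induction l with
  | nil => simp
  | cons i l ih =>
    simp only [List.flatMap_cons]
    rw [List.pairwise_append]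
    refine ⟨hin i (by simp), ?_, ?_⟩
    · exact ih (hl.of_cons) (fun j hj => hin j (by simp [hj]))
        (fun j hj j' hj' => hcross j (by simp [hj]) j' (by simp [hj']))
    · intro a ha b hb
      obtain ⟨j, hj, hbj⟩ := List.mem_flatMap.mp hb
      exact hcross i (by simp) j (by simp [hj]) (List.rel_of_pairwise_cons hl hj) a ha b hbj

-- ---- shapes and keys ----
theorem mem_Ehor (board : List (List String)) (r c : Int) {t : String × Int × Int × Int}
    (h : t ∈ Ehor board r c) : ∃ L, t = ("hor", r, c, L) := by
  unfold Ehor at h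
  split_ifs at h <;> simp at h
  exact ⟨_, h.2⟩

theorem mem_Ever (board : List (List String)) (r c : Int) {t : String × Int × Int × Int}
    (h : t ∈ Ever board r c) : ∃ L, t = ("ver", r, c, L) := by
  unfold Ever at h
  split_ifs at h <;> simp at h
  exact ⟨_, h.2⟩

theorem slotKey_hor (r c L : Int) : slotKey ("hor", r, c, L) = toLex (r, 2 * c) := by
  simp [slotKey]

theorem slotKey_ver (r c L : Int) : slotKey ("ver", r, c, L) = toLex (r, 2 * c + 1) := by
  simp [slotKey]

-- ---- B's vertical pass ----
theorem vers_eq (board : List (List String)) :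
    ((PySem.List.pyRange 0 ((board.foldl (fun m row => max m row.length) 0 : Nat) : Int)).flatMap
      (fun c => (PySem.List.pyRange 0 (board.length : Int)).flatMap (fun r =>
        if altAcc board r c && !altAcc board (r - 1) c then
          if 1 < 1 + (altVCount board c (r + 1) board.length : Int) then
            [("ver", r, c, 1 + (altVCount board c (r + 1) board.length : Int))]
          else []
        else []))) =
    ((PySem.List.pyRange 0 ((board.foldl (fun m row => max m row.length) 0 : Nat) : Int)).flatMap
      (fun c => (PySem.List.pyRange 0 (board.length : Int)).flatMap (fun r => Ever board r c))) := by
  apply flatMap_congr_mem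
  intro c hc
  apply flatMap_congr_mem
  intro r hr
  rw [PySem.List.mem_pyRange_one] at hc hr
  unfold Ever
  by_cases hg : (altAcc board r c && !altAcc board (r - 1) c) = true
  · rw [if_pos hg, if_pos hg]
    have hacc : altAcc board r c = true := by
      rcases Bool.and_eq_true _ _ |>.mp hg with ⟨h1, _⟩; exact h1
    have hp : pvAccA board r c = true := by
      rw [accA_eq_altAcc board hr.1 hc.1]; exact hacc
    have step : pvCount (fun i => pvAccA board i c) r (board.length + 1)
        = pvCount (fun i => pvAccA board i c) (r + 1) board.length + 1 := by
      simp only [pvCount, hp, if_true]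
    rw [step]
    have hcg : pvCount (fun i => pvAccA board i c) (r + 1) board.length
        = pvCount (fun i => altAcc board i c) (r + 1) board.length := by
      apply pvCount_congr
      intro j _
      exact accA_eq_altAcc board (by omega) hc.1
    rw [hcg, ← altVCount_eq_pvCount]
    rw [show (altVCount board c (r + 1) board.length : Int) + 1
        = 1 + (altVCount board c (r + 1) board.length : Int) by ring]
  · rw [if_neg hg, if_neg hg]

-- Ever vanishes beyond the row's own width
theorem Ever_eq_nil_of_wide (board : List (List String)) (r c : Int)
    (h : ((rowL board r).length : Int) ≤ c) : Ever board r c = [] := by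
  unfold Ever
  rw [altAcc_false board r c (by omega)]
  simp

-- ---- the permutation and the order ----
theorem getA_eq_E (board : List (List String)) (hpre : Pre_get_board_data board) :
    get_board_data board =
      (PySem.List.pyRange 0 (board.length : Int)).flatMap (fun r =>
        (PySem.List.pyRange 0 ((rowL board r).length : Int)).flatMap
          (fun c => Ehor board r c ++ Ever board r c)) := by
  rw [getA_eq_flatMap]
  apply flatMap_congr_mem
  intro r hrm
  apply flatMap_congr_mem
  intro c hcm
  rw [PySem.List.mem_pyRange_one] at hrm hcm
  exact cellE_eq board hpre r c hrm.1 hrm.2 hcm.1 hcm.2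

theorem perm_main (board : List (List String)) (hpre : Pre_get_board_data board) :
    (get_board_data board).Perm
      (altRows 0 board ++
        (PySem.List.pyRange 0 ((board.foldl (fun m row => max m row.length) 0 : Nat) : Int)).flatMap
          (fun c => (PySem.List.pyRange 0 (board.length : Int)).flatMap (fun r => Ever board r c))) := by
  rw [getA_eq_E board hpre]
  refine (flatMap_congr_perm _ _ _ (fun r _ => flatMap_append_perm _ _ _)).trans ?_
  refine (flatMap_append_perm _ _ _).trans ?_
  refine List.Perm.append ?_ ?_
  · rw [altRows_eq board]
  · have hwiden : ∀ r ∈ PySem.List.pyRange 0 (board.length : Int),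
        (PySem.List.pyRange 0 ((rowL board r).length : Int)).flatMap (fun c => Ever board r c)
          = (PySem.List.pyRange 0
              ((board.foldl (fun m row => max m row.length) 0 : Nat) : Int)).flatMap
              (fun c => Ever board r c) := by
      intro r hrm
      rw [PySem.List.mem_pyRange_one] at hrm
      have hmem : rowL board r ∈ board := by
        rw [rowL_eq_getElem board hrm.1 hrm.2]
        exact List.getElem_mem _
      have hle : (rowL board r).length ≤ board.foldl (fun m row => max m row.length) 0 :=
        (PySem.List.le_foldl_max_nat board List.length 0).2 _ hmem
      rw [PySem.List.pyRange_one_append 0 ((rowL board r).length : Int)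
        ((board.foldl (fun m row => max m row.length) 0 : Nat) : Int)
        (Int.natCast_nonneg _) (by exact_mod_cast hle)]
      rw [List.flatMap_append]
      have hnil : (PySem.List.pyRange ((rowL board r).length : Int)
          ((board.foldl (fun m row => max m row.length) 0 : Nat) : Int)).flatMap
          (fun c => Ever board r c) = [] := by
        rw [List.flatMap_eq_nil_iff]
        intro c hcm
        rw [PySem.List.mem_pyRange_one] at hcm
        exact Ever_eq_nil_of_wide board r c (by omega)
      rw [hnil, List.append_nil]
    rw [flatMap_congr_mem _ _ _ hwiden]
    exact flatMap_swap_perm _ _ _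

theorem pairwise_ite_singleton {α : Type} (P : α → α → Prop) (c : Prop) [Decidable c]
    (t : α) : List.Pairwise P (if c then [t] else []) := by
  split <;> simp

theorem key_mem (board : List (List String)) (r c : Int) {t : String × Int × Int × Int}
    (h : t ∈ Ehor board r c ++ Ever board r c) :
    slotKey t = toLex (r, 2 * c) ∨ slotKey t = toLex (r, 2 * c + 1) := by
  rcases List.mem_append.mp h with h | h
  · obtain ⟨L, rfl⟩ := mem_Ehor board r c h
    left; exact slotKey_hor r c L
  · obtain ⟨L, rfl⟩ := mem_Ever board r c h
    right; exact slotKey_ver r c L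

theorem pairwise_main (board : List (List String)) (hpre : Pre_get_board_data board) :
    (get_board_data board).Pairwise (fun a b => slotKey a < slotKey b) := by
  rw [getA_eq_E board hpre]
  apply pairwise_flatMap_key _ _ slotKey (PySem.List.pairwise_lt_pyRange_one _ _)
  · intro r hrm
    apply pairwise_flatMap_key _ _ slotKey (PySem.List.pairwise_lt_pyRange_one _ _)
    · intro c hcm
      rw [List.pairwise_append]
      refine ⟨by unfold Ehor; split_ifs <;> first | exact pairwise_ite_singleton _ _ _ | simp,
        by unfold Ever; split_ifs <;> first | exact pairwise_ite_singleton _ _ _ | simp, ?_⟩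
      intro a ha b hb
      obtain ⟨La, rfl⟩ := mem_Ehor board r c ha
      obtain ⟨Lb, rfl⟩ := mem_Ever board r c hb
      rw [slotKey_hor, slotKey_ver, Prod.Lex.lt_iff]
      simp
    · intro c hcm c' hcm' hlt a ha b hb
      rcases key_mem board r c ha with hk | hk <;> rcases key_mem board r c' hb with hk' | hk' <;>
        rw [hk, hk', Prod.Lex.lt_iff] <;> simp <;> omega
  · intro r hrm r' hrm' hlt a ha b hb
    obtain ⟨c, hcm, hac⟩ := List.mem_flatMap.mp ha
    obtain ⟨c', hcm', hbc⟩ := List.mem_flatMap.mp hb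
    rcases key_mem board r c hac with hk | hk <;> rcases key_mem board r' c' hbc with hk' | hk' <;>
      rw [hk, hk', Prod.Lex.lt_iff] <;> simp <;> omega

-- ---- sorted2 with the packed key is sorted with the lexicographic key ----
theorem sorted2_eq_sorted_slotKey (xs : List (String × Int × Int × Int)) :
    PySem.List.sorted2 xs (fun t => t.2.1)
        (fun t => 2 * t.2.2.1 + (if t.1 == "ver" then 1 else 0)) =
      PySem.List.sorted xs slotKey := by
  unfold PySem.List.sorted2
  rw [PySem.List.sorted_eq_foldl_insertBy]
  simp only [Bool.false_eq_true, if_false]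
  congr 1
  funext acc x
  congr 1
  funext a b
  rw [Bool.eq_iff_iff]
  simp only [Bool.or_eq_true, Bool.and_eq_true, Bool.not_eq_true', decide_eq_true_eq,
    decide_eq_false_iff_not, slotKey, Prod.Lex.lt_iff, ofLex_toLex]
  by_cases ha : a.1 == "ver" <;> by_cases hb : b.1 == "ver" <;> simp [ha, hb] <;> omega

theorem main_eq (board : List (List String)) (hpre : Pre_get_board_data board) :
    get_board_data board = get_board_data_alt board := by
  simp only [get_board_data_alt]
  rw [vers_eq board, sorted2_eq_sorted_slotKey]
  exact (PySem.List.sorted_eq_of_perm_of_pairwise_lt _ _ slotKey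
    (perm_main board hpre) (pairwise_main board hpre)).symm

-- ===== VERDICT (by name: the statement is the Claim_ definition above) =====
theorem get_board_data_spec : Claim_equal_get_board_data := by
  intro board _ hpre
  unfold Spec_get_board_data
  exact main_eq board hpre
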